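-- pv_equiv track=rewrite | github.com/seankatauskas/NYC-Restaurant-Website-Coverage-Optimization | cover_algorithms.py | find_dual_range_space
-- ===== SOURCE A (Python) =====
-- def find_dual_range_space(X, Ranges):
--     """Create the dual range space (X⊥, R⊥) based on unique identifiers."""
--     X_dual = list(range(len(Ranges)))  # Each element in X_dual represents a range in the original Ranges
--     R_dual = {x: set() for x in X}  # Each R_x will contain indices of ranges that include x
--
--     # Populate R_dual with indices of ranges containing each unique identifier in X
--     for i, R in enumerate(Ranges):
--         for x in R:
--             if x in R_dual:
--                 R_dual[x].add(i)
--
--     # Convert R_dual to a list of sets for easier processing in dual form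
--     R_dual_list = [R_dual[x] for x in X]
--
--     return X_dual, R_dual_list
-- ===== SOURCE B (Python) =====
-- def find_dual_range_space(X, Ranges):
--     """Create the dual range space (X_dual, R_dual) based on unique identifiers."""
--     X_dual = list(range(len(Ranges)))
--     R_dual_list = [{i for i, R in enumerate(Ranges) if x in R} for x in X]
--     return X_dual, R_dual_list
-- ===== Notes on version B (the rewrite author's own statement) =====
-- stated objective: simpler
-- what changed: Replaces A's dict-of-sets accumulator (pre-seed a dict keyed by X, scatter range indices into it, then read it back per x) with a direct gather: each element's index set is computed by one comprehension scanning enumerate(Ranges) with a membership test, flipping the loop nesting and removing the dict entirely.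
import Mathlib
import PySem

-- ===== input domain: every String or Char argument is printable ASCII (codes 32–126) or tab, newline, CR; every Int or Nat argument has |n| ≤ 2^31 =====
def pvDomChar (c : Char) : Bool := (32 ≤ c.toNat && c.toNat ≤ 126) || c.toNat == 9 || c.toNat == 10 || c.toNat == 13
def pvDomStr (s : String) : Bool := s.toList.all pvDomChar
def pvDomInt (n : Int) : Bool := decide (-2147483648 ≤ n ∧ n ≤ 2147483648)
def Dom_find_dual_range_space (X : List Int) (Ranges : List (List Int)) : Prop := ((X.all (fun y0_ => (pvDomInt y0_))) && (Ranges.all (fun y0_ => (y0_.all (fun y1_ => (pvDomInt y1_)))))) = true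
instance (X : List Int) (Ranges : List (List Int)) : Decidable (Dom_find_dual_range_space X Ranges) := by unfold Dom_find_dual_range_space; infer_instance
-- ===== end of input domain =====

-- B replaces A's dict-of-sets scatter pass with a per-element gather comprehension
-- over enumerate(Ranges); same return value, no dict accumulator (objective: simpler).

-- ===== PORT A =====
def find_dual_range_space (X : List Int) (Ranges : List (List Int)) : List Int × List (List Int) :=
  let X_dual := PySem.List.pyRange 0 (Ranges.length : Int) 1
  let R_dual : PySem.Dict Int (PySem.Set Int) :=
    X.foldl (fun d x => d.insert x PySem.Set.empty) PySem.Dict.empty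
  let R_dual2 : PySem.Dict Int (PySem.Set Int) :=
    (PySem.List.enumerate Ranges 0).foldl
      (fun d p => p.2.foldl
        (fun d x => if d.contains x then d.modify x PySem.Set.empty (fun s => PySem.Set.add s p.1) else d) d)
      R_dual
  let R_dual_list := X.map (fun x => R_dual2.getD x PySem.Set.empty)
  (X_dual, R_dual_list)

-- ===== PORT B =====
def find_dual_range_space_alt (X : List Int) (Ranges : List (List Int)) : List Int × List (List Int) :=
  (PySem.List.pyRange 0 (Ranges.length : Int) 1,
   X.map (fun x => (PySem.List.enumerate Ranges 0).foldl
     (fun s p => if x ∈ p.2 then PySem.Set.add s p.1 else s) PySem.Set.empty))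

-- ===== PRECONDITION & SPEC =====
def Spec_find_dual_range_space (X : List Int) (Ranges : List (List Int)) (out : List Int × List (List Int)) : Prop := out = find_dual_range_space_alt X Ranges
instance (X : List Int) (Ranges : List (List Int)) (out : List Int × List (List Int)) : Decidable (Spec_find_dual_range_space X Ranges out) := by unfold Spec_find_dual_range_space; infer_instance

-- ===== CLAIM (what is proved, stated in full; the proofs are below) =====
def Claim_equal_find_dual_range_space : Prop := ∀ (X : List Int) (Ranges : List (List Int)), Dom_find_dual_range_space X Ranges → Spec_find_dual_range_space X Ranges (find_dual_range_space X Ranges)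

-- ===== LEMMAS AND PROOFS =====

-- A's inner loop over one range preserves the key set of the dict.
theorem pv_contains_inner (R : List Int) (d : PySem.Dict Int (PySem.Set Int)) (i x : Int) :
    (R.foldl (fun d y => if d.contains y then d.modify y PySem.Set.empty (fun s => PySem.Set.add s i) else d) d).contains x
      = d.contains x := by
  induction R generalizing d with
  | nil => rfl
  | cons y R ih =>
    simp only [List.foldl_cons]
    by_cases hy : d.contains y = true
    · rw [if_pos hy, ih, PySem.Dict.contains_modify]
      by_cases hxy : x = y <;> simp [hxy, hy]
    · rw [if_neg hy]; exact ih d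

-- Effect of A's inner loop on the value stored at a present key x.
theorem pv_getD_inner (R : List Int) (d : PySem.Dict Int (PySem.Set Int)) (i x : Int)
    (hx : d.contains x = true) :
    (R.foldl (fun d y => if d.contains y then d.modify y PySem.Set.empty (fun s => PySem.Set.add s i) else d) d).getD x PySem.Set.empty
      = if x ∈ R then PySem.Set.add (d.getD x PySem.Set.empty) i else d.getD x PySem.Set.empty := by
  induction R generalizing d with
  | nil => simp
  | cons y R ih =>
    simp only [List.foldl_cons]
    by_cases hy : d.contains y = true
    · have hx' : (d.modify y PySem.Set.empty (fun s => PySem.Set.add s i)).contains x = true := by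
        rw [PySem.Dict.contains_modify]
        by_cases hxy : x = y <;> simp [hxy, hy, hx]
      rw [if_pos hy, ih _ hx']
      by_cases hxy : x = y
      · subst hxy
        rw [PySem.Dict.getD_modify_self]
        by_cases hm : x ∈ R
        · simp [hm]
        · simp [hm]
      · rw [PySem.Dict.getD_modify_of_ne d PySem.Set.empty _ hxy]
        by_cases hm : x ∈ R <;> simp [hm, hxy]
    · rw [if_neg hy, ih _ hx]
      have hxy : x ≠ y := by intro h; subst h; exact hy hx
      by_cases hm : x ∈ R <;> simp [hm, hxy]

-- A's outer loop over the enumerated ranges, read back at a present key x,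
-- equals B's gather fold started from the stored value.
theorem pv_getD_outer (L : List (Int × List Int)) (d : PySem.Dict Int (PySem.Set Int)) (x : Int)
    (hx : d.contains x = true) :
    (L.foldl (fun d p => p.2.foldl
        (fun d y => if d.contains y then d.modify y PySem.Set.empty (fun s => PySem.Set.add s p.1) else d) d) d).getD x PySem.Set.empty
      = L.foldl (fun s p => if x ∈ p.2 then PySem.Set.add s p.1 else s) (d.getD x PySem.Set.empty) := by
  induction L generalizing d with
  | nil => rfl
  | cons p L ih =>
    simp only [List.foldl_cons]
    have hx' := (pv_contains_inner p.2 d p.1 x).trans hx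
    rw [ih _ hx', pv_getD_inner p.2 d p.1 x hx]

-- The seeded dict contains every element of X.
theorem pv_contains_seed (X : List Int) (x : Int) (hx : x ∈ X) :
    (X.foldl (fun d x => d.insert x PySem.Set.empty) (PySem.Dict.empty : PySem.Dict Int (PySem.Set Int))).contains x = true := by
  rw [PySem.Dict.contains_iff_mem_keys, PySem.Dict.keys_foldl_insert]
  exact (PySem.Set.mem_update _ _ _).2 (Or.inr (by simpa using hx))

-- Every stored value of the seeded dict is the empty set.
theorem pv_getD_seed (X : List Int) (d : PySem.Dict Int (PySem.Set Int))
    (h : ∀ k, d.getD k PySem.Set.empty = PySem.Set.empty) (x : Int) :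
    (X.foldl (fun d x => d.insert x PySem.Set.empty) d).getD x PySem.Set.empty = PySem.Set.empty := by
  induction X generalizing d with
  | nil => simpa using h x
  | cons y X ih =>
    simp only [List.foldl_cons]
    refine ih _ (fun k => ?_)
    rw [PySem.Dict.getD_insert]
    by_cases hk : k = y
    · simp [hk]
    · rw [if_neg hk]; exact h k

-- ===== VERDICT (by name: the statement is the Claim_ definition above) =====
theorem find_dual_range_space_spec : Claim_equal_find_dual_range_space := by
  intro X Ranges _
  unfold Spec_find_dual_range_space find_dual_range_space find_dual_range_space_alt
  simp only
  refine Prod.ext rfl ?_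
  refine List.map_congr_left (fun x hx => ?_)
  rw [pv_getD_outer _ _ x (pv_contains_seed X x hx),
      pv_getD_seed X PySem.Dict.empty (by simp) x]
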